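-- pv_equiv track=rewrite | github.com/SatvikR123/Customer_Support_Chatbot | src/utils/direct_loader.py | process_return_policy
-- ===== SOURCE A (Python) =====
-- from typing import Dict, List, Any, Optional, Tuple
--
-- def process_return_policy(content: str) -> List[Dict[str, str]]:
--     """
--     Process return policy content into documents for the vector database.
--
--     Args:
--         content: Raw content from the return policy page
--
--     Returns:
--         List of documents ready for the vector database
--     """
--     # Split the content into sections for better retrieval
--     docs = []
--
--     # Clean up the content - remove common navigation elements and headers
--     cleaned_content = content
--     for term in ["Categories", "Navigation", "boAt Lifestyle", "Newsletter", "Search", "Most Searched & Bought"]: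
--         cleaned_content = cleaned_content.replace(term, "")
--
--     # Simple section detection in the return policy content
--     sections = [
--         "Return Policy",
--         "Replacement Policy",
--         "Cancellation Policy",
--         "Product Pricing",
--         "Security",
--         "Out of Stock situations",
--         "Delivery of products",
--         "Delivery Charges"
--     ]
--
--     section_texts = {}
--     current_section = None
--
--     for line in cleaned_content.split("\n"):
--         line = line.strip()
--         if not line:
--             continue
--
--         # Check if this line is a section header
--         if line in sections:
--             current_section = line
--             section_texts[current_section] = []
--         elif current_section:
--             section_texts[current_section].append(line)
--
--     # Create documents for each section
--     for section, lines in section_texts.items():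
--         if lines:
--             docs.append({
--                 "title": f"boAt {section}",
--                 "content": f"boAt {section}:\n\n" + "\n".join(lines)
--             })
--
--     # If no sections were found, create a single document with the cleaned content
--     if not docs:
--         docs.append({
--             "title": "boAt Return Policy",
--             "content": cleaned_content
--         })
--
--     return docs
-- ===== SOURCE B (Python) =====
-- # B: index-free two-phase decomposition — segment the stripped lines into
-- # (header, block) chunks by takewhile-style slicing, then merge with dict()
-- # (first-seen key order, last block wins) instead of A's stateful line scan.
--
-- _SECTIONS = [
--     "Return Policy",
--     "Replacement Policy",
--     "Cancellation Policy",
--     "Product Pricing",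
--     "Security",
--     "Out of Stock situations",
--     "Delivery of products",
--     "Delivery Charges",
-- ]
--
-- _NOISE = ["Categories", "Navigation", "boAt Lifestyle", "Newsletter",
--           "Search", "Most Searched & Bought"]
--
--
-- def process_return_policy(content: str):
--     cleaned = content
--     for term in _NOISE:
--         cleaned = cleaned.replace(term, "")
--
--     lines = [l for l in (raw.strip() for raw in cleaned.split("\n")) if l]
--
--     # chunk the line list: each header owns the run of lines up to the next header
--     pairs = []
--     i, n = 0, len(lines)
--     while i < n:
--         line = lines[i]
--         i += 1
--         if line in _SECTIONS:
--             j = i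
--             while j < n and lines[j] not in _SECTIONS:
--                 j += 1
--             pairs.append((line, lines[i:j]))
--             i = j
--
--     merged = dict(pairs)  # duplicate headers: first-seen position, last block
--
--     docs = [{"title": "boAt " + s, "content": "boAt " + s + ":\n\n" + "\n".join(b)}
--             for s, b in merged.items() if b]
--     if not docs:
--         docs = [{"title": "boAt Return Policy", "content": cleaned}]
--     return docs
-- ===== Notes on version B (the rewrite author's own statement) =====
-- stated objective: alternative
-- what changed: Replaces A's single stateful line scan (current-section flag plus a dict mutated per line) by a two-phase decomposition: segment the stripped non-empty lines into (header, block) chunks via takewhile-style slicing, then merge the chunk pairs with dict(pairs), which reproduces the duplicate-header behaviour (first-seen key order, last block wins).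
import Mathlib
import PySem

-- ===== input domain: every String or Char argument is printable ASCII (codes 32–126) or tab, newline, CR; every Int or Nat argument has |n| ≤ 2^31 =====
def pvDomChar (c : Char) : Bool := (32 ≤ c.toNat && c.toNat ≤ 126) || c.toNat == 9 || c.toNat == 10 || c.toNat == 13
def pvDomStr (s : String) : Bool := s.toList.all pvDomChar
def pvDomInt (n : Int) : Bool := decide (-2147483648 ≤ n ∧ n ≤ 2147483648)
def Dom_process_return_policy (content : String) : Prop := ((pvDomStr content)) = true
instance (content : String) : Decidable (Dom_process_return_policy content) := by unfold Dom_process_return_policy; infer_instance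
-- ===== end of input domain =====

-- B replaces A's stateful current-section line scan by a two-phase decomposition:
-- segment the stripped lines into (header, block) chunks, then merge with dict(pairs);
-- same return value, alternative structure (not claimed faster).

-- shared module constants (identical literals in both Pythons)
def pvNoise : List String :=
  ["Categories", "Navigation", "boAt Lifestyle", "Newsletter", "Search", "Most Searched & Bought"]

def pvSections : List String :=
  ["Return Policy", "Replacement Policy", "Cancellation Policy", "Product Pricing",
   "Security", "Out of Stock situations", "Delivery of products", "Delivery Charges"]

def pvClean (content : String) : String :=
  pvNoise.foldl (fun c t => PySem.Str.replace c t "") content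

-- the document literal {"title": f"boAt {s}", "content": f"boAt {s}:\n\n" + "\n".join(b)}
def pvDoc (s : String) (b : List String) : List (String × String) :=
  [("title", "boAt " ++ s), ("content", "boAt " ++ s ++ ":\n\n" ++ PySem.Str.join "\n" b)]

-- ===== PORT A =====
-- A's for-loop over cleaned_content.split("\n"): state = (current_section, section_texts)
def pvLoopA : List String → Option String × PySem.Dict String (List String) →
    Option String × PySem.Dict String (List String)
  | [], st => st
  | raw :: rest, (cur, d) =>
    let line := PySem.Str.strip raw
    if line = "" then pvLoopA rest (cur, d)
    else if line ∈ pvSections then pvLoopA rest (some line, d.insert line ([] : List String))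
    else match cur with
      | some s => pvLoopA rest (cur, d.modify s [] (· ++ [line]))
      | none => pvLoopA rest (cur, d)

def process_return_policy (content : String) : List (List (String × String)) :=
  let cleaned := pvClean content
  let texts := (pvLoopA ((PySem.Str.split? cleaned "\n").getD []) (none, PySem.Dict.empty)).2
  let docs := texts.items.foldl
    (fun docs p => if p.2 ≠ [] then docs ++ [pvDoc p.1 p.2] else docs)
    ([] : List (List (String × String)))
  if docs = [] then [[("title", "boAt Return Policy"), ("content", cleaned)]] else docs

-- ===== PORT B =====
-- Source B's inner while loop: lines up to the next section header
def pvQ (x : String) : Bool := !decide (x ∈ pvSections)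

-- Source B's outer while loop producing the (header, block) pairs
def pvChunks : List String → List (String × List String)
  | [] => []
  | l :: rest =>
    if l ∈ pvSections then
      (l, rest.takeWhile pvQ) :: pvChunks (rest.dropWhile pvQ)
    else pvChunks rest
termination_by ls => ls.length
decreasing_by
  · have := List.length_dropWhile_le pvQ rest; simp; omega
  · simp

def process_return_policy_alt (content : String) : List (List (String × String)) :=
  let cleaned := pvClean content
  let lines := (((PySem.Str.split? cleaned "\n").getD []).map PySem.Str.strip).filter
    (fun l => decide (l ≠ ""))
  let merged := PySem.Dict.ofList (pvChunks lines)
  let docs := (merged.items.filter (fun p => decide (p.2 ≠ []))).map (fun p => pvDoc p.1 p.2)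
  if docs = [] then [[("title", "boAt Return Policy"), ("content", cleaned)]] else docs

-- ===== PRECONDITION & SPEC =====
def Spec_process_return_policy (content : String) (out : List (List (String × String))) : Prop := out = process_return_policy_alt content
instance (content : String) (out : List (List (String × String))) : Decidable (Spec_process_return_policy content out) := by unfold Spec_process_return_policy; infer_instance

-- ===== CLAIM (what is proved, stated in full; the proofs are below) =====
def Claim_equal_process_return_policy : Prop := ∀ (content : String), Dom_process_return_policy content → Spec_process_return_policy content (process_return_policy content)

-- ===== LEMMAS AND PROOFS =====

-- A's loop with the strip/skip already performed (proof-side reformulation)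
def pvLoopA2 : List String → Option String → PySem.Dict String (List String) →
    PySem.Dict String (List String)
  | [], _, d => d
  | l :: rest, cur, d =>
    if l ∈ pvSections then pvLoopA2 rest (some l) (d.insert l ([] : List String))
    else match cur with
      | some s => pvLoopA2 rest cur (d.modify s [] (· ++ [l]))
      | none => pvLoopA2 rest none d

lemma pvLoopA_eq_loopA2 (raws : List String) (cur : Option String)
    (d : PySem.Dict String (List String)) :
    (pvLoopA raws (cur, d)).2 =
      pvLoopA2 ((raws.map PySem.Str.strip).filter (fun l => decide (l ≠ ""))) cur d := by
  induction raws generalizing cur d with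
  | nil => simp [pvLoopA, pvLoopA2]
  | cons raw rest ih =>
    simp only [pvLoopA, List.map_cons, List.filter_cons]
    by_cases h0 : PySem.Str.strip raw = ""
    · simp [h0, ih]
    · by_cases h1 : PySem.Str.strip raw ∈ pvSections
      · simp [h0, h1, pvLoopA2, ih]
      · cases cur with
        | some s => simp [h0, h1, pvLoopA2, ih]
        | none => simp [h0, h1, pvLoopA2, ih]

abbrev pvIns (d : PySem.Dict String (List String)) (p : String × List String) :
    PySem.Dict String (List String) := d.insert p.1 p.2

lemma pvLoopA2_some (ls : List String) (s : String) (v : List String)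
    (d : PySem.Dict String (List String)) :
    pvLoopA2 ls (some s) (d.insert s v) =
      (pvChunks (ls.dropWhile pvQ)).foldl pvIns (d.insert s (v ++ ls.takeWhile pvQ)) := by
  induction ls generalizing s v d with
  | nil => simp [pvLoopA2, pvChunks]
  | cons x rest ih =>
    by_cases hx : x ∈ pvSections
    · have hq : pvQ x = false := by simp [pvQ, hx]
      rw [List.dropWhile_cons_of_neg (by simp [hq]), List.takeWhile_cons_of_neg (by simp [hq])]
      simp only [pvLoopA2, if_pos hx, pvChunks, List.foldl_cons, List.append_nil]
      have := ih x [] (d.insert s v)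
      simpa [pvIns] using this
    · have hq : pvQ x = true := by simp [pvQ, hx]
      rw [List.dropWhile_cons_of_pos hq, List.takeWhile_cons_of_pos hq]
      simp only [pvLoopA2, if_neg hx, PySem.Dict.modify, PySem.Dict.getD_insert_self,
        PySem.Dict.insert_insert_self]
      rw [ih s (v ++ [x]) d]
      simp

lemma pvLoopA2_none (ls : List String) (d : PySem.Dict String (List String)) :
    pvLoopA2 ls none d = (pvChunks ls).foldl pvIns d := by
  induction ls generalizing d with
  | nil => simp [pvLoopA2, pvChunks]
  | cons x rest ih =>
    by_cases hx : x ∈ pvSections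
    · simp only [pvLoopA2, if_pos hx, pvChunks, List.foldl_cons]
      have := pvLoopA2_some rest x [] d
      simpa [pvIns] using this
    · simp [pvLoopA2, hx, pvChunks, ih]

-- ===== VERDICT (by name: the statement is the Claim_ definition above) =====
theorem process_return_policy_spec : Claim_equal_process_return_policy := by
  intro content _
  unfold Spec_process_return_policy process_return_policy process_return_policy_alt
  simp only [PySem.Dict.ofList, PySem.Dict.update]
  rw [pvLoopA_eq_loopA2, pvLoopA2_none]
  have hfold := PySem.List.foldl_append_if (fun p : String × List String => decide (p.2 ≠ []))
    (fun p => pvDoc p.1 p.2)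
    ((List.foldl pvIns PySem.Dict.empty
      (pvChunks ((((PySem.Str.split? (pvClean content) "\n").getD []).map PySem.Str.strip).filter
        (fun l => decide (l ≠ ""))))).items) []
  simp only [decide_eq_true_eq, List.nil_append] at hfold
  rw [hfold]
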